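-- pv_equiv track=rewrite | github.com/KatharinaTrinley/multilingual-internal-representations | experiments/activation_frequency_exp/improved_fig_codemixing_simplified2.py | remove_shared_neurons
-- ===== SOURCE A (Python) =====
-- def remove_shared_neurons(specialized_neurons):
--     """Removes neurons that are shared across all languages from each language's specialized neuron set."""
--     all_langs = list(specialized_neurons.values())
--     if not all_langs:
--         return specialized_neurons  # Edge case: empty input
--
--     shared_neurons = set.intersection(*all_langs)
--
--     filtered_neurons = {
--         lang: neurons - shared_neurons
--         for lang, neurons in specialized_neurons.items()
--     }
--
--     return filtered_neurons
-- ===== SOURCE B (Python) =====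
-- def remove_shared_neurons(specialized_neurons):
--     """Removes neurons that are shared across all languages from each language's specialized neuron set."""
--     if not specialized_neurons:
--         return specialized_neurons
--     counts = {}
--     for neurons in specialized_neurons.values():
--         for n in neurons:
--             counts[n] = counts.get(n, 0) + 1
--     total = len(specialized_neurons)
--     return {lang: {n for n in neurons if counts.get(n, 0) != total}
--             for lang, neurons in specialized_neurons.items()}
-- ===== Notes on version B (the rewrite author's own statement) =====
-- stated objective: alternative
-- what changed: Replaces the variadic set.intersection over all language sets (and per-language set subtraction) by a single frequency table: one pass counts in how many sets each neuron occurs, then each language keeps the neurons whose count is below the number of languages.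
import Mathlib
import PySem

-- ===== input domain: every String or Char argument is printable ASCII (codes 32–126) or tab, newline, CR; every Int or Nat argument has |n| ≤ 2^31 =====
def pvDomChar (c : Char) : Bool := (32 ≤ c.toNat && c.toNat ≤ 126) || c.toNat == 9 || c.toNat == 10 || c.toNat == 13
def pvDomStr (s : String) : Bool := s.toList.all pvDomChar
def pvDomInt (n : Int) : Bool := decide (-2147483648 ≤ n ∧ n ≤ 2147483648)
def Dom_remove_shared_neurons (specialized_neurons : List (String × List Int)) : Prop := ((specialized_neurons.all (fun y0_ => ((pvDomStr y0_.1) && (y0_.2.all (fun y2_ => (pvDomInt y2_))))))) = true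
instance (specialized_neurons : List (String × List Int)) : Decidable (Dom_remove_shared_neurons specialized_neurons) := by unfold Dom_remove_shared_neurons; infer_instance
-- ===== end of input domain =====

-- B replaces set.intersection over all language sets by a one-pass frequency table:
-- a neuron is shared iff its count equals the number of languages. (objective: alternative)

-- ===== PORT A =====
def remove_shared_neurons (specialized_neurons : List (String × List Int)) : List (String × List Int) :=
  let all_langs := specialized_neurons.map (·.2)
  match all_langs with
  | [] => specialized_neurons
  | h :: t =>
    let shared := t.foldl (fun acc s => PySem.Set.inter acc s) h
    specialized_neurons.map (fun p => (p.1, PySem.Set.diff p.2 shared))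

-- ===== PORT B =====
def remove_shared_neurons_alt (specialized_neurons : List (String × List Int)) : List (String × List Int) :=
  if specialized_neurons.isEmpty then specialized_neurons
  else
    let counts := specialized_neurons.foldl
      (fun d p => p.2.foldl (fun d n => d.insert n (d.getD n 0 + 1)) d) PySem.Dict.empty
    let total : Int := specialized_neurons.length
    specialized_neurons.map
      (fun p => (p.1, PySem.Set.ofList (p.2.filter (fun n => counts.getD n 0 != total))))

-- ===== PRECONDITION & SPEC =====
-- Pre_ only requires the association list to actually represent a Python dict of sets:
-- pairwise-distinct language keys and duplicate-free neuron lists (a list with duplicate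
-- keys or duplicate set elements does not arise from any Python input to A).
def Pre_remove_shared_neurons (specialized_neurons : List (String × List Int)) : Prop :=
  (specialized_neurons.map Prod.fst).Nodup ∧ ∀ p ∈ specialized_neurons, p.2.Nodup
instance (specialized_neurons : List (String × List Int)) : Decidable (Pre_remove_shared_neurons specialized_neurons) := by unfold Pre_remove_shared_neurons; infer_instance

def pvWitness_remove_shared_neurons : (List (String × List Int)) :=
  [("en", [1, 2, 4]), ("de", [2, 3, 4]), ("fr", [4, 2])]

def Spec_remove_shared_neurons (specialized_neurons : List (String × List Int)) (out : List (String × List Int)) : Prop := out = remove_shared_neurons_alt specialized_neurons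
instance (specialized_neurons : List (String × List Int)) (out : List (String × List Int)) : Decidable (Spec_remove_shared_neurons specialized_neurons out) := by unfold Spec_remove_shared_neurons; infer_instance

-- ===== CLAIM (what is proved, stated in full; the proofs are below) =====
def Claim_equal_remove_shared_neurons : Prop := ∀ (specialized_neurons : List (String × List Int)), Dom_remove_shared_neurons specialized_neurons → Pre_remove_shared_neurons specialized_neurons → Spec_remove_shared_neurons specialized_neurons (remove_shared_neurons specialized_neurons)

-- ===== LEMMAS AND PROOFS =====

-- the counter's value at n is the total number of occurrences of n across all value lists
theorem counts_getD (sn : List (String × List Int)) (d : PySem.Dict Int Int) (n : Int) :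
    ((sn.foldl (fun d p => p.2.foldl (fun d n => d.insert n (d.getD n 0 + 1)) d) d).getD n 0)
      = d.getD n 0 + (sn.map (fun p => (p.2.count n : Int))).sum := by
  induction sn generalizing d with
  | nil => simp
  | cons q rest ih =>
    simp [List.foldl_cons, ih, PySem.Dict.getD_foldl_insert_add_one]
    ring

-- membership in the folded intersection
theorem mem_foldl_inter (t : List (List Int)) (acc : List Int) (n : Int) :
    n ∈ t.foldl (fun acc s => PySem.Set.inter acc s) acc ↔ n ∈ acc ∧ ∀ s ∈ t, n ∈ s := by
  induction t generalizing acc with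
  | nil => simp
  | cons s rest ih =>
    simp [List.foldl_cons, ih, PySem.Set.mem_inter]
    tauto

theorem remove_shared_neurons_spec : Claim_equal_remove_shared_neurons := by
  intro sn _dom pre
  unfold Spec_remove_shared_neurons remove_shared_neurons remove_shared_neurons_alt
  obtain ⟨_keys_nodup, vals_nodup⟩ := pre
  match hsn : sn with
  | [] => simp
  | q :: rest =>
    -- the two filters use extensionally equal predicates
    have hpred : ∀ n : Int,
        (!PySem.Set.contains
            ((rest.map (·.2)).foldl (fun acc s => PySem.Set.inter acc s) q.2) n)
        = (((q :: rest).foldl (fun d p => p.2.foldl (fun d n => d.insert n (d.getD n 0 + 1)) d)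
              PySem.Dict.empty).getD n 0 != ((q :: rest).length : Int)) := by
      intro n
      have hmem : n ∈ (rest.map (·.2)).foldl (fun acc s => PySem.Set.inter acc s) q.2
          ↔ ∀ p ∈ q :: rest, n ∈ p.2 := by
        rw [mem_foldl_inter]
        constructor
        · intro h12 p hp
          rcases List.mem_cons.mp hp with rfl | hp'
          · exact h12.1
          · exact h12.2 _ (List.mem_map_of_mem hp')
        · intro h
          exact ⟨h q (List.mem_cons_self ..), by
            intro s hs
            obtain ⟨p, hp, rfl⟩ := List.mem_map.mp hs
            exact h p (List.mem_cons_of_mem _ hp)⟩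
      have hcnt : (((q :: rest).foldl
            (fun d p => p.2.foldl (fun d n => d.insert n (d.getD n 0 + 1)) d)
            PySem.Dict.empty).getD n 0)
          = (((q :: rest).countP (fun p => decide (n ∈ p.2)) : Nat) : Int) := by
        rw [counts_getD]
        simp only [PySem.Dict.getD_empty, zero_add]
        have : ∀ l : List (String × List Int), (∀ p ∈ l, p.2.Nodup) →
            (l.map (fun p => (p.2.count n : Int))).sum
              = ((l.countP (fun p => decide (n ∈ p.2)) : Nat) : Int) := by
          intro l hl
          induction l with
          | nil => simp
          | cons a b ihb =>
            have ha : a.2.count n = if n ∈ a.2 then 1 else 0 := by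
              by_cases h : n ∈ a.2
              · simp [h, List.count_eq_one_of_mem (hl a (List.mem_cons_self ..)) h]
              · simp [h, List.count_eq_zero_of_not_mem h]
            simp [List.countP_cons, ihb (fun p hp => hl p (List.mem_cons_of_mem _ hp)), ha]
            by_cases h : n ∈ a.2 <;> simp [h]
            ring
        exact this _ vals_nodup
      have hle : (q :: rest).countP (fun p => decide (n ∈ p.2)) ≤ (q :: rest).length :=
        List.countP_le_length
      rw [hcnt]
      by_cases hall : ∀ p ∈ q :: rest, n ∈ p.2
      · have heq : (q :: rest).countP (fun p => decide (n ∈ p.2)) = (q :: rest).length :=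
          List.countP_eq_length.mpr (by simpa using hall)
        simp [PySem.Set.contains_eq_listContains, heq, hmem.mpr hall]
      · have hlt : (q :: rest).countP (fun p => decide (n ∈ p.2)) < (q :: rest).length := by
          refine lt_of_le_of_ne hle ?_
          intro hc
          exact hall (by simpa using List.countP_eq_length.mp hc)
        have hnm : n ∉ (rest.map (·.2)).foldl (fun acc s => PySem.Set.inter acc s) q.2 :=
          fun h => hall (hmem.mp h)
        simp only [List.length_cons] at hlt
        simp [PySem.Set.contains_eq_listContains, hnm]
        omega
    have hone : ∀ p ∈ q :: rest,
        (p.1, PySem.Set.diff p.2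
            ((rest.map (·.2)).foldl (fun acc s => PySem.Set.inter acc s) q.2))
        = (p.1, PySem.Set.ofList (p.2.filter (fun n =>
            ((q :: rest).foldl (fun d p => p.2.foldl (fun d n => d.insert n (d.getD n 0 + 1)) d)
              PySem.Dict.empty).getD n 0 != ((q :: rest).length : Int)))) := by
      intro p hp
      refine Prod.ext rfl ?_
      have hnodup : p.2.Nodup := vals_nodup p hp
      have hfnodup : (p.2.filter (fun n =>
          ((q :: rest).foldl (fun d p => p.2.foldl (fun d n => d.insert n (d.getD n 0 + 1)) d)
            PySem.Dict.empty).getD n 0 != ((q :: rest).length : Int))).Nodup := hnodup.filter _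
      dsimp only
      rw [PySem.Set.ofList_eq_self_of_nodup _ hfnodup]
      simp only [PySem.Set.diff]
      exact List.filter_congr (fun n _ => hpred n)
    simpa using List.map_congr_left hone
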